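-- pv_equiv track=rewrite | github.com/hjylha/krypto | krypto.py | does_word_match
-- ===== SOURCE A (Python) =====
-- def does_word_match(word, codeword):
--     if len(word) != len(codeword):
--         return False
--     for i, chars in enumerate(zip(word, codeword)):
--         char, char_r = chars
--         for char_prev, char_r_prev in zip(word[:i], codeword[:i]):
--             if char_r == char_r_prev and char != char_prev:
--                 return False
--             if char_r == char_r_prev and char == char_prev:
--                 break
--             if char_r != char_r_prev and char == char_prev:
--                 return False
--     return True
-- ===== SOURCE B (Python) =====
-- def does_word_match(word, codeword):
--     return [word.index(c) for c in word] == [codeword.index(c) for c in codeword]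
-- ===== Notes on version B (the rewrite author's own statement) =====
-- stated objective: simpler
-- what changed: Replaces the nested pairwise consistency scan with two independently computed first-occurrence-index signatures compared for equality (unequal lengths yield signatures of different lengths, so the explicit length check disappears).
import Mathlib
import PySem

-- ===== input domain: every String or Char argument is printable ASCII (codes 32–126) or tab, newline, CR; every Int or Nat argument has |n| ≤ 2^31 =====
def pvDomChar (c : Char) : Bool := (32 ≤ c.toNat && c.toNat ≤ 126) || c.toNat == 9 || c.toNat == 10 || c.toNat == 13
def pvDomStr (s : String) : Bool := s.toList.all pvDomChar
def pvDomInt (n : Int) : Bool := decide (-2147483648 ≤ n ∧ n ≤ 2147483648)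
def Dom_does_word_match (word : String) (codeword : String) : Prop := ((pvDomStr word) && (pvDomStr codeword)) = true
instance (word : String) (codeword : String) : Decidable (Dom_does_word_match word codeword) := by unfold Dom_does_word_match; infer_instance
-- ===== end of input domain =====

-- B replaces A's nested pairwise-consistency scan by comparing the two first-occurrence
-- index signatures of word and codeword; objective: simpler.

-- ===== PORT A =====
-- the inner 'for char_prev, char_r_prev in zip(word[:i], codeword[:i])' loop
-- (returns false for 'return False', true for 'break' or normal completion)
def pvInnerA (ch cr : Char) : List (Char × Char) → Bool
  | [] => true
  | (cp, crp) :: rest =>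
    if cr = crp ∧ ch ≠ cp then false
    else if cr = crp ∧ ch = cp then true
    else if cr ≠ crp ∧ ch = cp then false
    else pvInnerA ch cr rest

-- the outer 'for i, chars in enumerate(zip(word, codeword))' loop; the first argument
-- is the already-processed prefix zip(word[:i], codeword[:i])
def pvOuterA (pre : List (Char × Char)) : List (Char × Char) → Bool
  | [] => true
  | (ch, cr) :: rest =>
    if pvInnerA ch cr pre then pvOuterA (pre ++ [(ch, cr)]) rest else false

def does_word_match (word : String) (codeword : String) : Bool :=
  if word.toList.length ≠ codeword.toList.length then false
  else pvOuterA [] (word.toList.zip codeword.toList)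

-- ===== PORT B =====
-- [s.index(c) for c in s]; s.index never raises here since each c is drawn from s,
-- so PySem.List.index? is always some and the getD 0 default is unreachable
def pvPattern (l : List Char) : List Int :=
  l.map (fun ch => ((PySem.List.index? l ch).getD 0 : Nat))

def does_word_match_alt (word : String) (codeword : String) : Bool :=
  pvPattern word.toList == pvPattern codeword.toList

-- ===== PRECONDITION & SPEC =====
def Spec_does_word_match (word : String) (codeword : String) (out : Bool) : Prop := out = does_word_match_alt word codeword
instance (word : String) (codeword : String) (out : Bool) : Decidable (Spec_does_word_match word codeword out) := by unfold Spec_does_word_match; infer_instance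

-- ===== CLAIM (what is proved, stated in full; the proofs are below) =====
def Claim_equal_does_word_match : Prop := ∀ (word : String) (codeword : String), Dom_does_word_match word codeword → Spec_does_word_match word codeword (does_word_match word codeword)

-- ===== LEMMAS AND PROOFS =====

-- the consistency relation A checks between two (word-char, codeword-char) pairs
def pvP (a b : Char × Char) : Prop := (a.2 = b.2 ↔ a.1 = b.1)

theorem pvInnerA_iff (ch cr : Char) (pre : List (Char × Char)) (h : pre.Pairwise pvP) :
    pvInnerA ch cr pre = true ↔ ∀ p ∈ pre, pvP p (ch, cr) := by
  induction pre with
  | nil => simp [pvInnerA]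
  | cons a rest ih =>
    obtain ⟨cp, crp⟩ := a
    rw [List.pairwise_cons] at h
    obtain ⟨h1, h2⟩ := h
    by_cases hcr : cr = crp <;> by_cases hch : ch = cp
    · -- break: head matches both components
      simp only [pvInnerA, List.forall_mem_cons]
      rw [if_neg (fun hcon => hcon.2 hch), if_pos ⟨hcr, hch⟩]
      constructor
      · intro _
        refine ⟨iff_of_true hcr.symm hch.symm, fun q hq => ?_⟩
        have h1q := h1 q hq
        show q.2 = cr ↔ q.1 = ch
        rw [hcr, hch]
        exact ⟨fun hx => (h1q.mp hx.symm).symm, fun hx => (h1q.mpr hx.symm).symm⟩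
      · intro _; rfl
    · -- return False: codeword chars equal, word chars differ
      simp only [pvInnerA, List.forall_mem_cons]
      rw [if_pos ⟨hcr, hch⟩]
      constructor
      · intro hfalse; exact absurd hfalse (by simp)
      · intro hall; exact (hch ((hall.1.mp hcr.symm).symm)).elim
    · -- return False: word chars equal, codeword chars differ
      simp only [pvInnerA, List.forall_mem_cons]
      rw [if_neg (fun hcon => hcr hcon.1), if_neg (fun hcon => hcr hcon.1),
        if_pos ⟨hcr, hch⟩]
      constructor
      · intro hfalse; exact absurd hfalse (by simp)
      · intro hall; exact (hcr ((hall.1.mpr hch.symm).symm)).elim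
    · -- continue with the rest of the prefix
      simp only [pvInnerA, List.forall_mem_cons]
      rw [if_neg (fun hcon => hcr hcon.1), if_neg (fun hcon => hcr hcon.1),
        if_neg (fun hcon => hch hcon.2), ih h2]
      constructor
      · intro hall
        exact ⟨iff_of_false (fun hx => hcr hx.symm) (fun hx => hch hx.symm), hall⟩
      · intro hall; exact hall.2

theorem pvOuterA_iff (rest : List (Char × Char)) : ∀ (pre : List (Char × Char)),
    pre.Pairwise pvP → (pvOuterA pre rest = true ↔ (pre ++ rest).Pairwise pvP) := by
  induction rest with
  | nil => intro pre hpre; simp [pvOuterA, hpre]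
  | cons a rest ih =>
    intro pre hpre
    obtain ⟨ch, cr⟩ := a
    simp only [pvOuterA]
    by_cases hin : pvInnerA ch cr pre = true
    · have hall := (pvInnerA_iff ch cr pre hpre).mp hin
      have hpre' : (pre ++ [(ch, cr)]).Pairwise pvP := by
        rw [List.pairwise_append]
        exact ⟨hpre, List.pairwise_singleton _ _, by
          intro a ha b hb; rw [List.mem_singleton] at hb; subst hb; exact hall a ha⟩
      rw [if_pos hin, ih _ hpre', List.append_assoc]
      simp
    · rw [if_neg hin]
      constructor
      · intro hfalse; exact absurd hfalse (by simp)
      · intro hp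
        exfalso
        apply hin
        rw [pvInnerA_iff ch cr pre hpre]
        rw [List.pairwise_append] at hp
        intro p hp'
        exact hp.2.2 p hp' (ch, cr) (by simp)

theorem pvIndex?_getElem (l : List Char) (i : Nat) (hi : i < l.length) :
    ∃ (k : Nat) (hkl : k < l.length),
      PySem.List.index? l (l[i]'hi) = some k ∧ l[k]'hkl = l[i]'hi ∧
      (∀ j (hj : j < k), l[j]'(by omega) ≠ l[i]'hi) ∧ k ≤ i := by
  have hm : l[i]'hi ∈ l := List.getElem_mem hi
  have hs := (PySem.List.index?_isSome_iff l (l[i]'hi)).mpr hm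
  obtain ⟨k, hk⟩ := Option.isSome_iff_exists.mp hs
  obtain ⟨hkl, hkv, hmin⟩ := PySem.List.getElem_of_index?_eq_some hk
  refine ⟨k, hkl, hk, hkv, hmin, ?_⟩
  by_contra hki
  exact hmin i (by omega) rfl

-- the pairwise condition, read at indices
theorem pvPairwise_zip_iff (w v : List Char) (hl : w.length = v.length) :
    (w.zip v).Pairwise pvP ↔
      ∀ i j (hi : i < w.length) (hj : j < w.length) (hic : i < v.length) (hjc : j < v.length),
        i < j → (v[i]'hic = v[j]'hjc ↔ w[i]'hi = w[j]'hj) := by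
  rw [List.pairwise_iff_getElem]
  have hz : (w.zip v).length = w.length := by simp [hl]
  constructor
  · intro h i j hi hj hic hjc hij
    have := h i j (by omega) (by omega) hij
    simpa [pvP, List.getElem_zip] using this
  · intro h i j hi hj hij
    have hiw : i < w.length := by omega
    have hjw : j < w.length := by omega
    have := h i j hiw hjw (by omega) (by omega) hij
    simpa [pvP, List.getElem_zip] using this

theorem pvPattern_eq_iff (w v : List Char) :
    pvPattern w = pvPattern v ↔
      (w.length = v.length ∧ ∀ i (hi : i < w.length) (hic : i < v.length),
        PySem.List.index? w (w[i]'hi) = PySem.List.index? v (v[i]'hic)) := by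
  constructor
  · intro h
    have hlen : w.length = v.length := by
      have := congrArg List.length h
      simpa [pvPattern] using this
    refine ⟨hlen, fun i hi hic => ?_⟩
    have hiw : i < (pvPattern w).length := by simpa [pvPattern] using hi
    have hic' : i < (pvPattern v).length := by simpa [pvPattern] using hic
    have hgi : (pvPattern w)[i]'hiw = (pvPattern v)[i]'hic' := by simp [h]
    obtain ⟨k, hkl, hk, -, -, -⟩ := pvIndex?_getElem w i hi
    obtain ⟨k', hkl', hk', -, -, -⟩ := pvIndex?_getElem v i hic
    simp only [pvPattern, List.getElem_map, hk, hk', Option.getD_some] at hgi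
    have hkk : k = k' := by exact_mod_cast hgi
    rw [hk, hk', hkk]
  · intro h
    obtain ⟨hlen, h⟩ := h
    apply List.ext_getElem
    · simp [pvPattern, hlen]
    · intro i hi hic
      have hiw : i < w.length := by simpa [pvPattern] using hi
      have hicc : i < v.length := by simpa [pvPattern] using hic
      simp only [pvPattern, List.getElem_map]
      rw [h i hiw hicc]

theorem pvMain (w v : List Char) (hl : w.length = v.length) :
    pvPattern w = pvPattern v ↔ (w.zip v).Pairwise pvP := by
  rw [pvPattern_eq_iff, pvPairwise_zip_iff w v hl]
  constructor
  · intro hh i j hi hj hic hjc hij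
    obtain ⟨-, h⟩ := hh
    obtain ⟨k, hkl, hki, hkv, hmin, hle⟩ := pvIndex?_getElem w j hj
    obtain ⟨k', hkl', hki', hkv', hmin', hle'⟩ := pvIndex?_getElem v j hjc
    have h1 : PySem.List.index? w (w[i]'hi) = PySem.List.index? v (v[i]'hic) := h i hi hic
    have h2 : PySem.List.index? w (w[j]'hj) = PySem.List.index? v (v[j]'hjc) := h j hj hjc
    constructor
    · intro hcij
      have h1' : PySem.List.index? w (w[i]'hi) = some k := by
        rw [h1, hcij, ← h2, hki]
      obtain ⟨hkl2, hkv2, -⟩ := PySem.List.getElem_of_index?_eq_some h1'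
      rw [← hkv2]
      exact hkv
    · intro hwij
      have h2' : PySem.List.index? v (v[i]'hic) = some k := by
        rw [← h1, hwij, hki]
      obtain ⟨hkl2, hkv2, -⟩ := PySem.List.getElem_of_index?_eq_some h2'
      have hkk : k = k' := by
        rw [hki, hki'] at h2
        simpa using h2
      subst hkk
      rw [← hkv2]
      exact hkv'
  · intro h
    refine ⟨hl, fun i hi hic => ?_⟩
    obtain ⟨k, hkl, hki, hkv, hmin, hle⟩ := pvIndex?_getElem w i hi
    obtain ⟨k', hkl', hki', hkv', hmin', hle'⟩ := pvIndex?_getElem v i hic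
    rw [hki, hki']
    have hklc : k < v.length := by omega
    -- v[k] = v[i]:
    have hck : v[k]'hklc = v[i]'hic := by
      rcases Nat.lt_or_ge k i with hki2 | hki2
      · exact (h k i hkl hi hklc hic hki2).mpr hkv
      · have : k = i := by omega
        subst this; rfl
    -- no earlier match in v:
    have hcmin : ∀ j (hj : j < k), v[j]'(by omega) ≠ v[i]'hic := by
      intro j hj hcj
      have hjw : j < w.length := by omega
      have hwj : w[j]'hjw = w[i]'hi := (h j i hjw hi (by omega) hic (by omega)).mp hcj
      exact hmin j hj hwj
    congr 1
    rcases Nat.lt_trichotomy k k' with hlt | heq | hgt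
    · exact absurd hck (hmin' k hlt)
    · exact heq
    · exact absurd hkv' (hcmin k' hgt)

theorem pvA_eq_B (word codeword : String) :
    does_word_match word codeword = does_word_match_alt word codeword := by
  rw [Bool.eq_iff_iff]
  unfold does_word_match does_word_match_alt
  rw [beq_iff_eq]
  by_cases hl : word.toList.length = codeword.toList.length
  · rw [if_neg (by simpa using hl)]
    rw [pvOuterA_iff _ [] (List.Pairwise.nil), List.nil_append, pvMain _ _ hl]
  · rw [if_pos (by simpa using hl)]
    constructor
    · intro hfalse; exact absurd hfalse (by simp)
    · intro hp
      exfalso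
      apply hl
      have := congrArg List.length hp
      simpa [pvPattern] using this

-- ===== VERDICT (by name: the statement is the Claim_ definition above) =====
theorem does_word_match_spec : Claim_equal_does_word_match := by
  intro word codeword _
  unfold Spec_does_word_match
  exact pvA_eq_B word codeword
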